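-- pv_equiv track=rewrite | github.com/rjbatista/AoC | aoc/event2016/day19/solve.py | p2_solve_for
-- ===== SOURCE A (Python) =====
-- import collections
--
-- def p2_solve_for(num):
--     l = collections.deque()
--     r = collections.deque()
--     for i in range(1, num + 1):
--         if i < (num // 2) + 1:
--             l.append(i)
--         else:
--             r.appendleft(i)
--
--     while l and r:
--         if len(l) > len(r):
--             l.pop()
--         else:
--             r.pop()
--
--         # rotate lists
--         r.appendleft(l.popleft())
--         l.append(r.pop())
--
--     return l[0] or r[0]
-- ===== SOURCE B (Python) =====
-- def p2_solve_for(num):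
--     # closed form: with p the largest power of 3 <= num,
--     # the survivor is num if num == p, num - p if num <= 2p, else 2*num - 3*p
--     p = 1
--     while p * 3 <= num:
--         p *= 3
--     if num == p:
--         return num
--     if num <= 2 * p:
--         return num - p
--     return 2 * num - 3 * p
-- ===== Notes on version B (the rewrite author's own statement) =====
-- stated objective: faster
-- what changed: Replaced the O(n) two-deque circle simulation with the closed-form Josephus-across formula based on the largest power of 3 <= num.
-- outside the precondition, e.g. on p2_solve_for(1): A raises IndexError, B returns 1
import Mathlib
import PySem

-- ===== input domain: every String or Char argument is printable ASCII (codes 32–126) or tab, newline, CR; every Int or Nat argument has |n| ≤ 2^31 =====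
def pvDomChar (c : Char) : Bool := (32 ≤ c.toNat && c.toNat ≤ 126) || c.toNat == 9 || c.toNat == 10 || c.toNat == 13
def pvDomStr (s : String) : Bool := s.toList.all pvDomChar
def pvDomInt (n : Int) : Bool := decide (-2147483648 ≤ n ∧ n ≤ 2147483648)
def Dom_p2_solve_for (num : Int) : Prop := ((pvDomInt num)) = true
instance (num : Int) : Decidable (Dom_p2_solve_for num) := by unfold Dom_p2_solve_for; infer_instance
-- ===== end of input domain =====

-- B replaces A's O(n) two-deque circle simulation by the closed-form Josephus-across
-- formula via the largest power of 3 ≤ num (objective: faster, asymptotically).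

-- ===== PORT A =====
-- The two Python deques are lists: `l` left-to-right, and `r` kept in REVERSED
-- orientation (head = Python r's right end), so r.appendleft x = _ ++ [x],
-- r.pop = tail, r[0] = getLast.
def p2LoopGo (l rr : List Int) : List Int × List Int :=
  if _h : l = [] ∨ rr = [] then (l, rr)     -- while l and r
  else
    -- if len(l) > len(r): l.pop()  else: r.pop()
    let p := if rr.length < l.length then (l.dropLast, rr) else (l, rr.tail)
    -- r.appendleft(l.popleft());  headD: Python raises IndexError on an empty deque,
    -- which is unreachable from inputs satisfying Pre_ (the default is never used there)
    let r2 := p.2 ++ [p.1.headD 0]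
    -- l.append(r.pop())
    p2LoopGo (p.1.tail ++ [r2.headD 0]) r2.tail
termination_by l.length + rr.length
decreasing_by
  rw [not_or] at _h
  have h1 : 1 ≤ l.length := List.length_pos_of_ne_nil _h.1
  have h2 : 1 ≤ rr.length := List.length_pos_of_ne_nil _h.2
  simp only [List.length_append, List.length_tail, List.length_cons]
  split <;> simp_all <;> omega

def p2_solve_for (num : Int) : Int :=
  let h := PySem.Int.floordiv num 2
  -- for i in range(1, num+1): if i < num//2 + 1: l.append(i) else: r.appendleft(i)
  let init := (PySem.List.pyRange 1 (num + 1) 1).foldl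
    (fun (st : List Int × List Int) i =>
      if i < h + 1 then (st.1 ++ [i], st.2) else (st.1, st.2 ++ [i]))
    ([], [])
  let fin := p2LoopGo init.1 init.2
  -- return l[0] or r[0]; headD/getLastD: IndexError inputs (num ≤ 1) are outside Pre_
  let x := fin.1.headD 0
  if x ≠ 0 then x else fin.2.getLastD 0

-- ===== PORT B =====
-- while p * 3 <= num: p *= 3, as fuelled structural recursion (p starts at 1 and at
-- least triples each step, so num.toNat steps are always enough fuel)
def pvPow3Go : Nat → Nat → Int → Int
  | 0, p, _ => (p : Int)
  | fuel + 1, p, num => if (p : Int) * 3 ≤ num then pvPow3Go fuel (p * 3) num else (p : Int)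

def p2_solve_for_alt (num : Int) : Int :=
  let p := pvPow3Go num.toNat 1 num
  if num = p then num
  else if num ≤ 2 * p then num - p
  else 2 * num - 3 * p

-- ===== PRECONDITION & SPEC =====
-- Pre_ excludes exactly num ≤ 1, where A raises IndexError (l[0] on an empty deque).
def Pre_p2_solve_for (num : Int) : Prop := 2 ≤ num
instance (num : Int) : Decidable (Pre_p2_solve_for num) := by unfold Pre_p2_solve_for; infer_instance
def pvWitness_p2_solve_for : Int := (5)

def Spec_p2_solve_for (num : Int) (out : Int) : Prop := out = p2_solve_for_alt num
instance (num : Int) (out : Int) : Decidable (Spec_p2_solve_for num out) := by unfold Spec_p2_solve_for; infer_instance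

-- ===== CLAIM (what is proved, stated in full; the proofs are below) =====
def Claim_equal_p2_solve_for : Prop := ∀ (num : Int), Dom_p2_solve_for num → Pre_p2_solve_for num → Spec_p2_solve_for num (p2_solve_for num)
-- ===== LEMMAS AND PROOFS =====

-- 0-based survivor position in a circle of n people in which the person opposite
-- (offset n/2 from the current person) is eliminated and the circle rotates by one.
def pvSigma : Nat → Nat
  | 0 => 0
  | 1 => 0
  | n + 2 =>
      let k := (pvSigma (n + 1) + 1) % (n + 1)
      if k < (n + 2) / 2 then k else k + 1

lemma pvSigma_lt : ∀ n : Nat, 1 ≤ n → pvSigma n < n := by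
  intro n hn
  match n, hn with
  | 1, _ => simp [pvSigma]
  | (m + 2), _ =>
    have hk : (pvSigma (m + 1) + 1) % (m + 1) < m + 1 := Nat.mod_lt _ (by omega)
    simp only [pvSigma]
    split <;> omega

-- one elimination step on the circle: the value at the survivor position of the
-- shrunken, rotated circle is the value at the survivor position of the full circle
lemma pvSigma_step (c : List Int) (n : Nat) (hn : c.length = n + 2) :
    ((c.eraseIdx ((n + 2) / 2)).rotate 1).getD (pvSigma (n + 1)) 0
      = c.getD (pvSigma (n + 2)) 0 := by
  have hσ : pvSigma (n + 1) < n + 1 := pvSigma_lt _ (by omega)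
  have hm : (n + 2) / 2 < c.length := by omega
  have hlen_e : (c.eraseIdx ((n + 2) / 2)).length = n + 1 := by
    rw [List.length_eraseIdx_of_lt hm, hn]
    omega
  have hi : pvSigma (n + 1) < ((c.eraseIdx ((n + 2) / 2)).rotate 1).length := by
    rw [List.length_rotate, hlen_e]; exact hσ
  have hk : (pvSigma (n + 1) + 1) % (n + 1) < n + 1 := Nat.mod_lt _ (by omega)
  have hσn : pvSigma (n + 2) =
      if (pvSigma (n + 1) + 1) % (n + 1) < (n + 2) / 2
      then (pvSigma (n + 1) + 1) % (n + 1) else (pvSigma (n + 1) + 1) % (n + 1) + 1 := by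
    simp only [pvSigma]
  rw [List.getD_eq_getElem _ _ hi, List.getElem_rotate, hσn]
  simp only [hlen_e]
  by_cases hlt : (pvSigma (n + 1) + 1) % (n + 1) < (n + 2) / 2
  · rw [if_pos hlt, List.getD_eq_getElem _ _ (show (pvSigma (n + 1) + 1) % (n + 1) < c.length by omega)]
    exact List.getElem_eraseIdx_of_lt (by omega) hlt
  · rw [if_neg hlt, List.getD_eq_getElem _ _ (show (pvSigma (n + 1) + 1) % (n + 1) + 1 < c.length by omega)]
    exact List.getElem_eraseIdx_of_ge (by omega) (by omega)

lemma erase_mid_append (l r : List Int) : (l ++ r).eraseIdx l.length = l ++ r.eraseIdx 0 := by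
  induction l with
  | nil => simp
  | cons x xs ih => simp [ih]

-- the deque loop returns the value at the survivor position of l ++ rr (and [])
lemma p2LoopGo_eq (N : Nat) : ∀ (l rr : List Int), l.length + rr.length = N →
    1 ≤ l.length → 1 ≤ rr.length →
    (l.length = rr.length ∨ l.length = rr.length + 1 ∨ rr.length = l.length + 1) →
    p2LoopGo l rr = ([(l ++ rr).getD (pvSigma N) 0], []) := by
  induction N using Nat.strong_induction_on with
  | _ N IH =>
    intro l rr hN hl hr hrel
    obtain ⟨x, xs, rfl⟩ : ∃ x xs, l = x :: xs := by
      cases l with | nil => simp at hl | cons a t => exact ⟨a, t, rfl⟩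
    obtain ⟨r0, rs, rfl⟩ : ∃ r0 rs, rr = r0 :: rs := by
      cases rr with | nil => simp at hr | cons a t => exact ⟨a, t, rfl⟩
    obtain ⟨n2, rfl⟩ : ∃ k, N = k + 2 := by
      refine ⟨N - 2, ?_⟩
      simp only [List.length_cons] at hN
      omega
    have hN' : xs.length + 1 + (rs.length + 1) = n2 + 2 := by simpa using hN
    have hrel' : xs.length = rs.length ∨ xs.length = rs.length + 1 ∨ rs.length = xs.length + 1 := by
      simpa using hrel
    by_cases hbig : (r0 :: rs).length < (x :: xs).length
    · -- len(l) > len(r): eliminate l's last; a = b + 1, so xs ≠ []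
      have hbig' : rs.length < xs.length := by simpa using hbig
      have hxs : xs ≠ [] := by
        intro h; subst h; simp at hbig'
      have hdl : (x :: xs).dropLast = x :: xs.dropLast := by
        cases xs with | nil => exact absurd rfl hxs | cons a t => simp
      have hlen_xs : 1 ≤ xs.length := List.length_pos_of_ne_nil hxs
      rw [p2LoopGo]
      rw [dif_neg (show ¬((x :: xs) = [] ∨ (r0 :: rs) = []) by simp)]
      simp only [if_pos hbig, hdl, List.cons_append, List.headD_cons, List.tail_cons]
      have hstep := IH (n2 + 1) (by omega) (xs.dropLast ++ [r0]) (rs ++ [x])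
        (by simp only [List.length_append, List.length_dropLast, List.length_cons,
              List.length_nil]; omega)
        (by simp) (by simp)
        (by simp only [List.length_append, List.length_dropLast, List.length_cons,
              List.length_nil]; omega)
      rw [hstep]
      have hc : ((x :: xs) ++ r0 :: rs).length = n2 + 2 := by
        simp only [List.length_append, List.length_cons]; omega
      have hstepσ := pvSigma_step ((x :: xs) ++ r0 :: rs) n2 hc
      simp only [List.cons_append] at hstepσ
      rw [← hstepσ]
      congr 1
      -- eliminated index (n2+2)/2 = l.length - 1 = xs.length (the last of l)
      have hidx : (n2 + 2) / 2 = xs.length := by omega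
      have herase : (x :: (xs ++ r0 :: rs)).eraseIdx ((n2 + 2) / 2)
          = (x :: xs.dropLast) ++ r0 :: rs := by
        rw [show (x :: (xs ++ r0 :: rs)) = (x :: xs) ++ r0 :: rs from by simp,
          hidx, show xs.length = (x :: xs).length - 1 from by simp,
          List.eraseIdx_append_of_lt_length (by simp) _, List.eraseIdx_length_sub_one, hdl]
      rw [herase,
        show ((x :: xs.dropLast) ++ r0 :: rs) = x :: (xs.dropLast ++ r0 :: rs) from by simp,
        List.rotate_cons_succ, List.rotate_zero]
      simp
    · -- else: eliminate r's right end
      have hbig' : xs.length ≤ rs.length := by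
        simp only [List.length_cons, not_lt] at hbig; omega
      by_cases hN2 : n2 = 0
      · -- sizes (1,1): one more iteration reaches ([x], [])
        subst hN2
        have hxs : xs = [] := by
          have := List.length_eq_zero_iff.mp (show xs.length = 0 by omega)
          exact this
        have hrs : rs = [] := by
          have := List.length_eq_zero_iff.mp (show rs.length = 0 by omega)
          exact this
        subst hxs; subst hrs
        rw [p2LoopGo]
        rw [dif_neg (show ¬(([x] : List Int) = [] ∨ ([r0] : List Int) = []) by simp)]
        norm_num
        rw [p2LoopGo]
        rw [dif_pos (by simp)]
        have h2 : pvSigma 2 = 0 := rfl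
        simp [h2]
      · -- n2 ≥ 1, so b ≥ 2 and rs ≠ []
        have hrs : rs ≠ [] := by
          intro hEq; subst hEq
          simp only [List.length_nil] at hbig' hN'
          omega
        obtain ⟨r1, rs', rfl⟩ : ∃ r1 rs', rs = r1 :: rs' := by
          cases rs with | nil => exact absurd rfl hrs | cons a t => exact ⟨a, t, rfl⟩
        simp only [List.length_cons] at hN' hrel' hbig'
        rw [p2LoopGo]
        rw [dif_neg (show ¬((x :: xs) = [] ∨ (r0 :: r1 :: rs') = []) by simp)]
        simp only [if_neg hbig, List.tail_cons, List.cons_append, List.headD_cons]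
        have hstep := IH (n2 + 1) (by omega) (xs ++ [r1]) (rs' ++ [x])
          (by simp only [List.length_append, List.length_cons, List.length_nil]; omega)
          (by simp) (by simp)
          (by simp only [List.length_append, List.length_cons, List.length_nil]; omega)
        rw [hstep]
        have hc : ((x :: xs) ++ r0 :: r1 :: rs').length = n2 + 2 := by
          simp only [List.length_append, List.length_cons]; omega
        have hstepσ := pvSigma_step ((x :: xs) ++ r0 :: r1 :: rs') n2 hc
        simp only [List.cons_append] at hstepσ
        rw [← hstepσ]
        congr 1
        -- eliminated index (n2+2)/2 = l.length (the right end of r)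
        have hidx : (n2 + 2) / 2 = (x :: xs).length := by
          simp only [List.length_cons] at hN' hrel' ⊢
          omega
        have herase : (x :: (xs ++ r0 :: r1 :: rs')).eraseIdx ((n2 + 2) / 2)
            = (x :: xs) ++ r1 :: rs' := by
          rw [show (x :: (xs ++ r0 :: r1 :: rs')) = (x :: xs) ++ r0 :: r1 :: rs' from by simp,
            hidx, erase_mid_append]
          rfl
        rw [herase,
          show ((x :: xs) ++ r1 :: rs') = x :: (xs ++ r1 :: rs') from by simp,
          List.rotate_cons_succ, List.rotate_zero]
        simp
-- continued below

-- the building fold appends every element below / not below the threshold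
lemma fold_part_lt (t : Int) : ∀ (c : List Int) (acc : List Int × List Int),
    (∀ i ∈ c, i < t) →
    c.foldl (fun (st : List Int × List Int) i =>
      if i < t then (st.1 ++ [i], st.2) else (st.1, st.2 ++ [i])) acc
      = (acc.1 ++ c, acc.2) := by
  intro c
  induction c with
  | nil => simp
  | cons a as ih =>
    intro acc hmem
    simp only [List.foldl_cons, if_pos (hmem a (by simp))]
    rw [ih _ (fun i hi => hmem i (by simp [hi]))]
    simp

lemma fold_part_ge (t : Int) : ∀ (c : List Int) (acc : List Int × List Int),
    (∀ i ∈ c, ¬ i < t) →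
    c.foldl (fun (st : List Int × List Int) i =>
      if i < t then (st.1 ++ [i], st.2) else (st.1, st.2 ++ [i])) acc
      = (acc.1, acc.2 ++ c) := by
  intro c
  induction c with
  | nil => simp
  | cons a as ih =>
    intro acc hmem
    simp only [List.foldl_cons, if_neg (hmem a (by simp))]
    rw [ih _ (fun i hi => hmem i (by simp [hi]))]
    simp

-- pvPow3Go climbs d more steps when the bracket says so and the fuel suffices
lemma pvPow3Go_eq : ∀ (d i fuel : Nat) (num : Int), d ≤ fuel →
    ((3 ^ (i + d) : Nat) : Int) ≤ num → num < ((3 ^ (i + d) * 3 : Nat) : Int) →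
    pvPow3Go fuel (3 ^ i) num = ((3 ^ (i + d) : Nat) : Int) := by
  intro d
  induction d with
  | zero =>
    intro i fuel num _ hlo hhi
    simp only [Nat.add_zero] at hlo hhi ⊢
    cases fuel with
    | zero => rfl
    | succ f =>
      rw [pvPow3Go, if_neg]
      push_cast at hhi ⊢
      omega
  | succ d ih =>
    intro i fuel num hfuel hlo hhi
    obtain ⟨f, rfl⟩ : ∃ f, fuel = f + 1 := ⟨fuel - 1, by omega⟩
    rw [show i + (d + 1) = (i + 1) + d from by omega] at hlo hhi ⊢
    have hcond : ((3 ^ i : Nat) : Int) * 3 ≤ num := by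
      have h1 : ((3 ^ (i + 1) : Nat) : Int) ≤ ((3 ^ ((i + 1) + d) : Nat) : Int) := by
        exact_mod_cast Nat.pow_le_pow_right (by norm_num) (by omega)
      have h2 : ((3 ^ (i + 1) : Nat) : Int) = ((3 ^ i : Nat) : Int) * 3 := by
        rw [pow_succ]; push_cast; ring
      omega
    rw [pvPow3Go, if_pos hcond]
    rw [show (3 : Nat) ^ i * 3 = 3 ^ (i + 1) from (pow_succ 3 i).symm]
    exact ih (i + 1) f num (by omega) hlo hhi

-- closed form for the survivor position, by strong induction on n
lemma pvSigma_closed : ∀ (n j : Nat), 1 ≤ n → 3 ^ j ≤ n → n < 3 * 3 ^ j →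
    pvSigma n = if n = 3 ^ j then n - 1
      else if n ≤ 2 * 3 ^ j then n - 3 ^ j - 1 else 2 * n - 3 * 3 ^ j - 1 := by
  intro n
  induction n using Nat.strong_induction_on with
  | _ n IH =>
    intro j hn hlo hhi
    cases n with
    | zero => omega
    | succ n1 =>
    cases n1 with
    | zero =>
      have hj0 : j = 0 := by
        by_contra h
        have h1 : 3 ^ 1 ≤ 3 ^ j := Nat.pow_le_pow_right (by norm_num) (by omega)
        norm_num at h1
        omega
      subst hj0
      norm_num [pvSigma]
    | succ m =>
      have h3j : 1 ≤ 3 ^ j := Nat.one_le_pow _ _ (by norm_num)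
      -- a power-of-three bracket for m + 1 = n - 1
      have hbr : ∃ j', 3 ^ j' ≤ m + 1 ∧ m + 1 < 3 * 3 ^ j' ∧
          (3 ^ j' = 3 ^ j ∨ (3 * 3 ^ j' = 3 ^ j ∧ m + 2 = 3 ^ j)) := by
        by_cases hcross : 3 ^ j ≤ m + 1
        · exact ⟨j, hcross, by omega, Or.inl rfl⟩
        · have hj1 : 1 ≤ j := by
            rcases Nat.eq_zero_or_pos j with h0 | h
            · subst h0; norm_num at hcross
            · exact h
          have hpow : (3 : Nat) ^ j = 3 * 3 ^ (j - 1) := by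
            conv_lhs => rw [show j = (j - 1) + 1 from by omega]
            rw [pow_succ]; ring
          have h3j' : 1 ≤ 3 ^ (j - 1) := Nat.one_le_pow _ _ (by norm_num)
          exact ⟨j - 1, by omega, by omega, Or.inr ⟨by omega, by omega⟩⟩
      obtain ⟨j', hlo', hhi', hj'rel⟩ := hbr
      have hIH := IH (m + 1) (by omega) j' (by omega) hlo' hhi'
      have hσlt : pvSigma (m + 1) < m + 1 := pvSigma_lt _ (by omega)
      have h3j'' : 1 ≤ 3 ^ j' := Nat.one_le_pow _ _ (by norm_num)
      have hmod : (pvSigma (m + 1) + 1) % (m + 1) =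
          if pvSigma (m + 1) + 1 = m + 1 then 0 else pvSigma (m + 1) + 1 := by
        by_cases hc : pvSigma (m + 1) + 1 = m + 1
        · rw [if_pos hc, hc, Nat.mod_self]
        · rw [if_neg hc, Nat.mod_eq_of_lt (by omega)]
      simp only [pvSigma, hmod]
      -- everything left is linear arithmetic in m, 3 ^ j' and 3 ^ j
      rcases hj'rel with h | ⟨h1, h2⟩ <;> split_ifs at hIH ⊢ <;> omega

-- every positive n lies in a power-of-three bracket
lemma pow3_bracket (n : Nat) (hn : 1 ≤ n) : ∃ j, 3 ^ j ≤ n ∧ n < 3 * 3 ^ j := by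
  refine ⟨Nat.log 3 n, Nat.pow_log_le_self 3 (by omega), ?_⟩
  have := Nat.lt_pow_succ_log_self (by norm_num : 1 < 3) n
  rwa [pow_succ, mul_comm] at this

-- A's whole run equals 1 + pvSigma num
lemma p2_solve_for_eq_sigma (num : Int) (hnum : 2 ≤ num) :
    p2_solve_for num = 1 + (pvSigma num.toNat : Int) := by
  have hfd : PySem.Int.floordiv num 2 = num / 2 :=
    PySem.Int.floordiv_eq_ediv_of_pos (by norm_num)
  have hhb : 1 ≤ num / 2 ∧ num / 2 < num := by omega
  set h := num / 2 with hh
  -- split the range at h + 1 = num//2 + 1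
  have hsplit : PySem.List.pyRange 1 (num + 1) 1 =
      PySem.List.pyRange 1 (h + 1) 1 ++ PySem.List.pyRange (h + 1) (num + 1) 1 :=
    PySem.List.pyRange_one_append 1 (h + 1) (num + 1) (by omega) (by omega)
  simp only [p2_solve_for, hfd]
  rw [hsplit, List.foldl_append]
  rw [fold_part_lt (h + 1) (PySem.List.pyRange 1 (h + 1) 1) (([], []) : List Int × List Int) (by
    intro i hi
    have := (PySem.List.mem_pyRange_one).1 hi
    omega)]
  simp only [List.nil_append]
  rw [fold_part_ge (h + 1) (PySem.List.pyRange (h + 1) (num + 1) 1)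
    ((PySem.List.pyRange 1 (h + 1) 1, []) : List Int × List Int) (by
    intro i hi
    have := (PySem.List.mem_pyRange_one).1 hi
    omega)]
  simp only [List.nil_append]
  have hlen1 : (PySem.List.pyRange 1 (h + 1) 1).length = h.toNat := by
    rw [PySem.List.length_pyRange_one]; omega
  have hlen2 : (PySem.List.pyRange (h + 1) (num + 1) 1).length = (num - h).toNat := by
    rw [PySem.List.length_pyRange_one]; omega
  have hloop := p2LoopGo_eq num.toNat (PySem.List.pyRange 1 (h + 1) 1)
    (PySem.List.pyRange (h + 1) (num + 1) 1)
    (by rw [hlen1, hlen2]; omega) (by rw [hlen1]; omega) (by rw [hlen2]; omega)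
    (by rw [hlen1, hlen2]; omega)
  rw [← hsplit] at hloop
  rw [hloop]
  have hσ : pvSigma num.toNat < num.toNat := pvSigma_lt _ (by omega)
  have hget : (PySem.List.pyRange 1 (num + 1) 1).getD (pvSigma num.toNat) 0
      = 1 + (pvSigma num.toNat : Int) := by
    rw [List.getD_eq_getElem _ _ (by rw [PySem.List.length_pyRange_one]; omega),
      PySem.List.getElem_pyRange_one]
  rw [hget]
  simp only [List.headD_cons]
  rw [if_pos (by intro hcontra; omega)]

-- B's whole run equals 1 + pvSigma num via the closed form
lemma p2_solve_for_alt_eq_sigma (num : Int) (hnum : 2 ≤ num) :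
    p2_solve_for_alt num = 1 + (pvSigma num.toNat : Int) := by
  obtain ⟨j, hlo, hhi⟩ := pow3_bracket num.toNat (by omega)
  have hfuel : j ≤ num.toNat := by
    have := Nat.lt_pow_self (show 1 < 3 by norm_num) (n := j)
    omega
  have hp : pvPow3Go num.toNat 1 num = ((3 ^ j : Nat) : Int) := by
    have := pvPow3Go_eq j 0 num.toNat num hfuel
      (by simp only [Nat.zero_add]; omega)
      (by simp only [Nat.zero_add]; omega)
    simpa using this
  have hσ := pvSigma_closed num.toNat j (by omega) hlo hhi
  have h3j : 1 ≤ 3 ^ j := Nat.one_le_pow _ _ (by norm_num)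
  simp only [p2_solve_for_alt, hp, hσ]
  split_ifs <;> omega

-- ===== VERDICT (by name: the statement is the Claim_ definition above) =====
theorem p2_solve_for_spec : Claim_equal_p2_solve_for := by
  intro num _ hpre
  unfold Spec_p2_solve_for
  rw [p2_solve_for_eq_sigma num hpre, p2_solve_for_alt_eq_sigma num hpre]
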